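-- pv_equiv track=rewrite | github.com/gfgffgdbd/UBS-2025-pythontesting | routes/safeguard.py | double_consonants_decode
-- ===== SOURCE A (Python) =====
-- def double_consonants_decode(x):
--     vowels = "aeiouAEIOU"
--     res = []
--     i = 0
--     while i < len(x):
--         c = x[i]
--         if c.isalpha() and c not in vowels:
--             # If next char is same consonant, skip one
--             if i + 1 < len(x) and x[i+1] == c:
--                 res.append(c)
--                 i += 2
--                 continue
--         res.append(c)
--         i += 1
--     return "".join(res)
-- ===== SOURCE B (Python) =====
-- def double_consonants_decode(x):
--     vowels = "aeiouAEIOU"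
--     out = []
--     i, n = 0, len(x)
--     while i < n:
--         c = x[i]
--         j = i + 1
--         while j < n and x[j] == c:
--             j += 1
--         k = j - i
--         if c.isalpha() and c not in vowels:
--             out.append(c * ((k + 1) // 2))
--         else:
--             out.append(c * k)
--         i = j
--     return "".join(out)
-- ===== Notes on version B (the rewrite author's own statement) =====
-- stated objective: alternative
-- what changed: Replaced the per-character lookahead walk by a run-length scan: B finds each maximal run of equal characters and emits ceil(k/2) copies for a consonant run of length k, the run verbatim otherwise.
import Mathlib
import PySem

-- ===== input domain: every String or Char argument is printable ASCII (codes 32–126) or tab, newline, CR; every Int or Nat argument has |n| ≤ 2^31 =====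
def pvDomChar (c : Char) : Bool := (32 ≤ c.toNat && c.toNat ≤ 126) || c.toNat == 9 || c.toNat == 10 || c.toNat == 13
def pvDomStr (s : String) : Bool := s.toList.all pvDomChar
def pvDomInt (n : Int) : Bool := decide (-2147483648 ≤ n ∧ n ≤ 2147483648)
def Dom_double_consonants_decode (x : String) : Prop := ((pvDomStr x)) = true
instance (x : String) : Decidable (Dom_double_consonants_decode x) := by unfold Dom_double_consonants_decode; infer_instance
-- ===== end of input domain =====

-- B replaces A's index-with-lookahead walk by a run-length scan: each maximal run
-- of equal characters is emitted as ceil(k/2) copies when it is a consonant run,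
-- verbatim otherwise (alternative decomposition, same cost).


-- ===== PORT A =====
-- c.isalpha() and c not in vowels, for a single character c
def pvIsCons (c : Char) : Bool := PySem.Chars.isalpha c && !("aeiouAEIOU".toList.contains c)

-- A's while-loop over indices: at c = x[i], looks ahead at x[i+1]; skips i by 2 on a pair
def pvGoA : List Char → List Char
  | [] => []
  | [c] => [c]
  | c :: d :: rest =>
    if pvIsCons c && d == c then c :: pvGoA rest
    else c :: pvGoA (d :: rest)

def double_consonants_decode (x : String) : String := String.ofList (pvGoA x.toList)

-- ===== PORT B =====
-- B's outer loop: split off the maximal leading run (the inner `while x[j] == c` is takeWhile/dropWhile)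
def pvRuns : List Char → List (Char × Nat)
  | [] => []
  | c :: rest =>
      (c, 1 + (rest.takeWhile (· == c)).length) :: pvRuns (rest.dropWhile (· == c))
termination_by l => l.length
decreasing_by
  exact Nat.lt_succ_of_le (List.length_dropWhile_le _ _)

-- per-run output: `c * ((k+1)//2)` for a consonant, `c * k` otherwise
def pvRunOut (p : Char × Nat) : List Char :=
  if pvIsCons p.1 then List.replicate ((p.2 + 1) / 2) p.1 else List.replicate p.2 p.1

def double_consonants_decode_alt (x : String) : String :=
  String.ofList ((pvRuns x.toList).flatMap pvRunOut)

-- ===== PRECONDITION & SPEC =====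
def Spec_double_consonants_decode (x : String) (out : String) : Prop := out = double_consonants_decode_alt x
instance (x : String) (out : String) : Decidable (Spec_double_consonants_decode x out) := by unfold Spec_double_consonants_decode; infer_instance

-- ===== CLAIM (what is proved, stated in full; the proofs are below) =====
def Claim_equal_double_consonants_decode : Prop := ∀ (x : String), Dom_double_consonants_decode x → Spec_double_consonants_decode x (double_consonants_decode x)

-- ===== LEMMAS AND PROOFS =====

-- A on a maximal run: replicate k c followed by rest not starting with c.
theorem pvGoA_run (c : Char) : ∀ (k : Nat) (rest : List Char), rest.head? ≠ some c →
    pvGoA (List.replicate k c ++ rest) = pvRunOut (c, k) ++ pvGoA rest := by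
  intro k
  induction k using Nat.strong_induction_on with
  | _ k ih =>
    intro rest hne
    match k with
    | 0 => simp [pvRunOut]
    | 1 =>
      simp only [List.replicate, List.singleton_append]
      have h1 : pvGoA (c :: rest) = c :: pvGoA rest := by
        cases rest with
        | nil => rfl
        | cons d r =>
          have hdc : (d == c) = false := by
            simp only [beq_eq_false_iff_ne, ne_eq]
            intro h; exact hne (by simp [h])
          simp [pvGoA, hdc]
      rw [h1]
      cases hic : pvIsCons c <;> simp [pvRunOut, hic]
    | (m + 2) =>
      have hrep : List.replicate (m + 2) c ++ rest
          = c :: c :: (List.replicate m c ++ rest) := by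
        simp [List.replicate_succ]
      rw [hrep]
      cases hic : pvIsCons c with
      | true =>
        have : pvGoA (c :: c :: (List.replicate m c ++ rest))
            = c :: pvGoA (List.replicate m c ++ rest) := by
          simp [pvGoA, hic]
        rw [this, ih m (by omega) rest hne]
        have : (m + 2 + 1) / 2 = (m + 1) / 2 + 1 := by omega
        simp [pvRunOut, hic, this, List.replicate_succ]
      | false =>
        have h2 : c :: (List.replicate m c ++ rest)
            = List.replicate (m + 1) c ++ rest := by simp [List.replicate_succ]
        have : pvGoA (c :: c :: (List.replicate m c ++ rest))
            = c :: pvGoA (c :: (List.replicate m c ++ rest)) := by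
          simp [pvGoA, hic]
        rw [this, h2, ih (m + 1) (by omega) rest hne]
        simp [pvRunOut, hic, List.replicate_succ]

-- the head of dropWhile fails the predicate
theorem pvHead_dropWhile_ne (c : Char) (l : List Char) :
    (l.dropWhile (· == c)).head? ≠ some c := by
  intro h
  cases hd : l.dropWhile (· == c) with
  | nil => rw [hd] at h; simp at h
  | cons b t =>
    rw [hd] at h
    have hb : b = c := by simpa using h
    have := List.head?_dropWhile_not (· == c) l
    rw [hd] at this
    simp [hb] at this

theorem pvGoA_eq_runs : ∀ (n : Nat) (l : List Char), l.length ≤ n →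
    pvGoA l = (pvRuns l).flatMap pvRunOut := by
  intro n
  induction n with
  | zero =>
    intro l hl
    have : l = [] := List.eq_nil_of_length_eq_zero (Nat.le_zero.mp hl)
    subst this; rw [pvRuns.eq_1]; rfl
  | succ n ih =>
    intro l hl
    cases l with
    | nil => rw [pvRuns.eq_1]; rfl
    | cons c rest =>
      have hsplit : c :: rest
          = List.replicate (1 + (rest.takeWhile (· == c)).length) c
            ++ rest.dropWhile (· == c) := by
        have ht : rest.takeWhile (· == c)
            = List.replicate (rest.takeWhile (· == c)).length c := by
          apply List.eq_replicate_of_mem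
          intro b hb
          exact beq_iff_eq.mp (List.mem_takeWhile_imp (p := (· == c)) hb)
        rw [Nat.add_comm, List.replicate_succ, List.cons_append]
        conv_lhs => rw [← List.takeWhile_append_dropWhile (p := (· == c)) (l := rest), ht]
      have hA : pvGoA (c :: rest)
          = pvRunOut (c, 1 + (rest.takeWhile (· == c)).length)
            ++ pvGoA (rest.dropWhile (· == c)) := by
        conv_lhs => rw [hsplit]
        exact pvGoA_run c _ _ (pvHead_dropWhile_ne c rest)
      have hlen : (rest.dropWhile (· == c)).length ≤ n := by
        have := List.length_dropWhile_le (· == c) rest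
        simp only [List.length_cons] at hl; omega
      rw [hA, ih _ hlen]
      conv_rhs => rw [pvRuns.eq_2]

      rw [List.flatMap_cons]

-- ===== VERDICT (by name: the statement is the Claim_ definition above) =====
theorem double_consonants_decode_spec : Claim_equal_double_consonants_decode := by
  intro x _
  unfold Spec_double_consonants_decode double_consonants_decode double_consonants_decode_alt
  rw [pvGoA_eq_runs x.toList.length x.toList le_rfl]
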